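-- pv_equiv track=rewrite | github.com/gto76/advent-of-code-2020 | advent_2020.py | problem_17_b
-- ===== SOURCE A (Python) =====
-- def problem_17_b(lines):
--     '''Starting with your given initial configuration, simulate six cycles in a 4-dimensional
--     space. How many cubes are left in the active state after the sixth cycle? 848'''
--     import collections, itertools
--     P = collections.namedtuple('P', 'x y z w')
--
--     def get_neighbours(p):
--         DELTAS = set(itertools.product([-1, 0, 1], repeat=4)) - {(0, 0, 0, 0)}
--         return {P(p.x+dx, p.y+dy, p.z+dz, p.w+dw) for dx, dy, dz, dw in DELTAS}
--
--     def should_be_active(p):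
--         n_active_neighbours = len(get_neighbours(p) & cubes)
--         return (p in cubes and 2 <= n_active_neighbours <= 3) or \
--                (p not in cubes and n_active_neighbours == 3)
--
--     cubes = {P(x, y, 0, 0) for y, line in enumerate(lines)
--                                for x, ch in enumerate(line) if ch == '#'}
--     for _ in range(6):
--         candidates = {p for cube in cubes for p in get_neighbours(cube)}
--         cubes = {p for p in candidates if should_be_active(p)}
--     return len(cubes)
-- ===== SOURCE B (Python) =====
-- def problem_17_b(lines):
--     '''Count active cubes after six cycles of 4D Conway life, via one
--     neighbour-counting dict pass per cycle instead of per-candidate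
--     set intersections.'''
--     active = {(x, y, 0, 0) for y, line in enumerate(lines)
--                            for x, ch in enumerate(line) if ch == '#'}
--     deltas = [(dx, dy, dz, dw)
--               for dx in (-1, 0, 1) for dy in (-1, 0, 1)
--               for dz in (-1, 0, 1) for dw in (-1, 0, 1)
--               if (dx, dy, dz, dw) != (0, 0, 0, 0)]
--     for _ in range(6):
--         counts = {}
--         for (x, y, z, w) in active:
--             for dx, dy, dz, dw in deltas:
--                 q = (x + dx, y + dy, z + dz, w + dw)
--                 counts[q] = counts.get(q, 0) + 1
--         active = {q for q, c in counts.items()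
--                     if c == 3 or (c == 2 and q in active)}
--     return len(active)
-- ===== Notes on version B (the rewrite author's own statement) =====
-- stated objective: alternative
-- what changed: Each cycle now makes one pass over the active cells incrementing a per-neighbour counter dict and reads the new generation off the counts, instead of rebuilding the 80-delta set per cell and intersecting each candidate's neighbour set with the active set.
import Mathlib
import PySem

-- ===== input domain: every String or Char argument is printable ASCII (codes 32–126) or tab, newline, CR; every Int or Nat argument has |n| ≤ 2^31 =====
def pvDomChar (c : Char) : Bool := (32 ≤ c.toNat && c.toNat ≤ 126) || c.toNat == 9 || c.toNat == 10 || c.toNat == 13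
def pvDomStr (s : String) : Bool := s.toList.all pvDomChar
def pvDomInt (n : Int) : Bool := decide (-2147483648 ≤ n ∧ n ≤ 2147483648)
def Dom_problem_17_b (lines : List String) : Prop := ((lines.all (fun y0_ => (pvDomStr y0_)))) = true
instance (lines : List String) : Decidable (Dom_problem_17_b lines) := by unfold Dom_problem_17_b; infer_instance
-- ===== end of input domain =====

-- B replaces A's per-candidate neighbour-set intersections by one neighbour-counting
-- dict pass per cycle (objective: alternative algorithm, same asymptotic cost).

abbrev PvP : Type := Int × Int × Int × Int

-- ===== PORT A =====
-- itertools.product([-1, 0, 1], repeat=4)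
def pvProdA : List PvP :=
  ([-1, 0, 1] : List Int).flatMap fun dx =>
  ([-1, 0, 1] : List Int).flatMap fun dy =>
  ([-1, 0, 1] : List Int).flatMap fun dz =>
  ([-1, 0, 1] : List Int).map fun dw => (dx, dy, dz, dw)

-- DELTAS = set(itertools.product([-1, 0, 1], repeat=4)) - {(0, 0, 0, 0)}
def pvDeltasA : PySem.Set PvP :=
  PySem.Set.diff (PySem.Set.ofList pvProdA) [((0 : Int), (0 : Int), (0 : Int), (0 : Int))]

def pvGetNeighboursA (p : PvP) : PySem.Set PvP :=
  PySem.Set.ofList (pvDeltasA.map fun d =>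
    (p.1 + d.1, p.2.1 + d.2.1, p.2.2.1 + d.2.2.1, p.2.2.2 + d.2.2.2))

def pvShouldBeActiveA (cubes : PySem.Set PvP) (p : PvP) : Bool :=
  let n := PySem.List.len (PySem.Set.inter (pvGetNeighboursA p) cubes)
  (cubes.contains p && (decide (2 ≤ n) && decide (n ≤ 3))) ||
    (!cubes.contains p && n == 3)

def pvInitA (lines : List String) : PySem.Set PvP :=
  PySem.Set.ofList ((PySem.List.enumerate lines).flatMap fun yl =>
    ((PySem.List.enumerate yl.2.toList).filter fun xc => xc.2 == '#').map fun xc =>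
      (xc.1, yl.1, (0 : Int), (0 : Int)))

def pvStepA (cubes : PySem.Set PvP) : PySem.Set PvP :=
  let candidates := PySem.Set.ofList (cubes.flatMap fun cube => pvGetNeighboursA cube)
  PySem.Set.ofList (candidates.filter fun p => pvShouldBeActiveA cubes p)

def problem_17_b (lines : List String) : Int :=
  let cubes := pvInitA lines
  let cubes := (PySem.List.pyRange 0 6 1).foldl (fun cubes _ => pvStepA cubes) cubes
  PySem.List.len cubes

-- ===== PORT B =====
def pvDeltasB : List PvP :=
  ([-1, 0, 1] : List Int).flatMap fun dx =>
  ([-1, 0, 1] : List Int).flatMap fun dy =>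
  ([-1, 0, 1] : List Int).flatMap fun dz =>
  (([-1, 0, 1] : List Int).map fun dw => (dx, dy, dz, dw)).filter fun t =>
    !(t == ((0 : Int), (0 : Int), (0 : Int), (0 : Int)))

def pvInitB (lines : List String) : PySem.Set PvP :=
  PySem.Set.ofList ((PySem.List.enumerate lines).flatMap fun yl =>
    ((PySem.List.enumerate yl.2.toList).filter fun xc => xc.2 == '#').map fun xc =>
      (xc.1, yl.1, (0 : Int), (0 : Int)))

def pvStepB (active : PySem.Set PvP) : PySem.Set PvP :=
  let counts : PySem.Dict PvP Int :=
    active.foldl (fun counts p =>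
      pvDeltasB.foldl (fun counts d =>
        let q : PvP := (p.1 + d.1, p.2.1 + d.2.1, p.2.2.1 + d.2.2.1, p.2.2.2 + d.2.2.2)
        counts.insert q (counts.getD q 0 + 1)) counts) PySem.Dict.empty
  PySem.Set.ofList ((counts.items.filter fun qc =>
    qc.2 == 3 || (qc.2 == 2 && active.contains qc.1)).map fun qc => qc.1)

def problem_17_b_alt (lines : List String) : Int :=
  let active := pvInitB lines
  let active := (PySem.List.pyRange 0 6 1).foldl (fun active _ => pvStepB active) active
  PySem.List.len active

-- ===== PRECONDITION & SPEC =====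
def Spec_problem_17_b (lines : List String) (out : Int) : Prop := out = problem_17_b_alt lines
instance (lines : List String) (out : Int) : Decidable (Spec_problem_17_b lines out) := by unfold Spec_problem_17_b; infer_instance

-- ===== CLAIM (what is proved, stated in full; the proofs are below) =====
def Claim_equal_problem_17_b : Prop := ∀ (lines : List String), Dom_problem_17_b lines → Spec_problem_17_b lines (problem_17_b lines)

-- ===== LEMMAS AND PROOFS =====

-- the neighbour list both programs traverse (proof-side view)
def pvNb (p : PvP) : List PvP :=
  pvDeltasB.map fun d => (p.1 + d.1, p.2.1 + d.2.1, p.2.2.1 + d.2.2.1, p.2.2.2 + d.2.2.2)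

-- number of active neighbours of q in s
def pvCnt (q : PvP) (s : List PvP) : Nat := s.countP fun p => decide (q ∈ pvNb p)

set_option maxRecDepth 20000 in
lemma pv_deltas_eq : (pvDeltasA : List PvP) = pvDeltasB := by decide

set_option maxRecDepth 20000 in
lemma pv_deltas_nodup : pvDeltasB.Nodup := by decide

set_option maxRecDepth 20000 in
lemma pv_deltas_neg : ∀ d ∈ pvDeltasB, ((-d.1, -d.2.1, -d.2.2.1, -d.2.2.2) : PvP) ∈ pvDeltasB := by decide

lemma pv_nb_nodup (p : PvP) : (pvNb p).Nodup := by
  refine List.Nodup.map ?_ pv_deltas_nodup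
  intro a b h
  obtain ⟨a1, a2, a3, a4⟩ := a; obtain ⟨b1, b2, b3, b4⟩ := b
  simp only [Prod.mk.injEq] at h ⊢
  omega

lemma pv_mem_nb_iff (p q : PvP) :
    q ∈ pvNb p ↔ ((q.1 - p.1, q.2.1 - p.2.1, q.2.2.1 - p.2.2.1, q.2.2.2 - p.2.2.2) : PvP) ∈ pvDeltasB := by
  unfold pvNb
  rw [List.mem_map]
  constructor
  · rintro ⟨⟨d1, d2, d3, d4⟩, hd, rfl⟩
    simpa using hd
  · intro h
    refine ⟨_, h, ?_⟩
    obtain ⟨q1, q2, q3, q4⟩ := q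
    simp only [Prod.mk.injEq]
    omega

lemma pv_nb_symm (p q : PvP) : q ∈ pvNb p ↔ p ∈ pvNb q := by
  rw [pv_mem_nb_iff, pv_mem_nb_iff]
  constructor
  · intro h
    simpa [neg_sub] using pv_deltas_neg _ h
  · intro h
    simpa [neg_sub] using pv_deltas_neg _ h

lemma pv_foldl_flatMap {α β γ : Type} (f : α → List β) (G : γ → β → γ) (l : List α) (c : γ) :
    l.foldl (fun c a => (f a).foldl G c) c = (l.flatMap f).foldl G c := by
  induction l generalizing c with
  | nil => simp
  | cons x xs ih => simp [List.flatMap_cons, List.foldl_append, ih]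

lemma pv_count_flatMap (q : PvP) (l : List PvP) :
    List.count q (l.flatMap pvNb) = pvCnt q l := by
  induction l with
  | nil => simp [pvCnt]
  | cons p ps ih =>
    simp only [List.flatMap_cons, List.count_append, ih, pvCnt, List.countP_cons]
    have hc := List.Nodup.count (a := q) (pv_nb_nodup p)
    by_cases h : q ∈ pvNb p <;> simp [h] at hc ⊢ <;> omega

lemma pv_mem_flatMap_iff (q : PvP) (l : List PvP) :
    q ∈ l.flatMap pvNb ↔ 0 < pvCnt q l := by
  rw [pvCnt, List.countP_pos_iff, List.mem_flatMap]
  simp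

lemma pv_inter_countP {l1 l2 : List PvP} (h1 : l1.Nodup) (h2 : l2.Nodup) :
    l1.countP (fun x => decide (x ∈ l2)) = l2.countP (fun x => decide (x ∈ l1)) := by
  rw [List.countP_eq_length_filter, List.countP_eq_length_filter]
  refine List.Perm.length_eq ?_
  rw [List.perm_ext_iff_of_nodup (List.Nodup.filter _ h1) (List.Nodup.filter _ h2)]
  intro a
  simp only [List.mem_filter, decide_eq_true_eq]
  tauto

lemma pv_nA (cubes : PySem.Set PvP) (hnd : cubes.Nodup) (q : PvP) :
    PySem.List.len (PySem.Set.inter (pvGetNeighboursA q) cubes) = (pvCnt q cubes : Int) := by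
  unfold PySem.List.len PySem.Set.inter pvGetNeighboursA
  rw [pv_deltas_eq]
  have hnb : List.map (fun d => (q.1 + d.1, q.2.1 + d.2.1, q.2.2.1 + d.2.2.1, q.2.2.2 + d.2.2.2))
      pvDeltasB = pvNb q := rfl
  rw [hnb]
  have hperm : (PySem.Set.ofList (pvNb q)).Perm (pvNb q) :=
    (List.perm_ext_iff_of_nodup (PySem.Set.nodup_ofList _) (pv_nb_nodup q)).2
      (fun a => PySem.Set.mem_ofList _ a)
  rw [(hperm.filter _).length_eq, ← List.countP_eq_length_filter]
  have h4 : (pvNb q).countP (fun x => PySem.Set.contains cubes x)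
      = (pvNb q).countP (fun x => decide (x ∈ cubes)) :=
    List.countP_congr fun x _ => by simp
  rw [h4, pv_inter_countP (pv_nb_nodup q) hnd]
  have h5 : cubes.countP (fun x => decide (x ∈ pvNb q)) = pvCnt q cubes := by
    simp only [pvCnt]
    exact List.countP_congr fun p _ => by simp [pv_nb_symm q p]
  rw [h5]

lemma pv_mem_getNeighboursA (c q : PvP) : q ∈ pvGetNeighboursA c ↔ q ∈ pvNb c := by
  unfold pvGetNeighboursA
  rw [pv_deltas_eq]
  exact PySem.Set.mem_ofList _ _

lemma pv_should_iff (cubes : PySem.Set PvP) (hnd : cubes.Nodup) (q : PvP) :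
    pvShouldBeActiveA cubes q = true ↔
      ((q ∈ cubes ∧ 2 ≤ pvCnt q cubes ∧ pvCnt q cubes ≤ 3) ∨
       (q ∉ cubes ∧ pvCnt q cubes = 3)) := by
  simp only [pvShouldBeActiveA]
  rw [pv_nA cubes hnd q]
  by_cases hm : q ∈ cubes
  · have hc : cubes.contains q = true := (PySem.Set.contains_iff _ _).2 hm
    simp only [hc, hm, Bool.true_and, Bool.not_true, Bool.false_and, Bool.or_false,
      Bool.and_eq_true, decide_eq_true_eq, not_true, false_and, or_false, true_and]
    omega
  · have hc : cubes.contains q = false := by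
      cases h : cubes.contains q
      · rfl
      · exact absurd ((PySem.Set.contains_iff _ _).1 h) hm
    simp only [hc, hm, Bool.false_and, Bool.not_false, Bool.true_and, Bool.false_or,
      beq_iff_eq, not_false_iff, true_and, false_and, false_or]
    omega

lemma pv_stepA_mem (cubes : PySem.Set PvP) (hnd : cubes.Nodup) (q : PvP) :
    q ∈ pvStepA cubes ↔
      (1 ≤ pvCnt q cubes) ∧
      ((q ∈ cubes ∧ 2 ≤ pvCnt q cubes ∧ pvCnt q cubes ≤ 3) ∨
       (q ∉ cubes ∧ pvCnt q cubes = 3)) := by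
  simp only [pvStepA, PySem.Set.mem_ofList, List.mem_filter, List.mem_flatMap,
    pv_mem_getNeighboursA, pv_should_iff cubes hnd q]
  have hex : (∃ c, c ∈ cubes ∧ q ∈ pvNb c) ↔ 1 ≤ pvCnt q cubes := by
    rw [pvCnt, Nat.le_iff_lt_or_eq]
    constructor
    · rintro ⟨c, hc, hq⟩
      have : 0 < cubes.countP fun p => decide (q ∈ pvNb p) :=
        List.countP_pos_iff.2 ⟨c, hc, by simpa using hq⟩
      omega
    · intro h
      have : 0 < cubes.countP fun p => decide (q ∈ pvNb p) := by omega
      obtain ⟨c, hc, hq⟩ := List.countP_pos_iff.1 this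
      exact ⟨c, hc, by simpa using hq⟩
  rw [hex]

lemma pv_counts_eq (active : PySem.Set PvP) :
    active.foldl (fun counts p =>
      pvDeltasB.foldl (fun counts d =>
        counts.insert (p.1 + d.1, p.2.1 + d.2.1, p.2.2.1 + d.2.2.1, p.2.2.2 + d.2.2.2)
          (counts.getD (p.1 + d.1, p.2.1 + d.2.1, p.2.2.1 + d.2.2.1, p.2.2.2 + d.2.2.2) 0 + 1))
        counts) PySem.Dict.empty
    = PySem.Dict.counter (active.flatMap pvNb) := by
  rw [← PySem.Dict.foldl_insert_getD_add_one_eq_counter, ← pv_foldl_flatMap]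
  refine PySem.List.foldl_congr_mem active _ _ _ ?_
  intro cs p _
  rw [pvNb, List.foldl_map]

lemma pv_stepB_mem (active : PySem.Set PvP) (q : PvP) :
    q ∈ pvStepB active ↔
      (pvCnt q active = 3 ∨ (pvCnt q active = 2 ∧ q ∈ active)) := by
  simp only [pvStepB]
  rw [pv_counts_eq, PySem.Set.mem_ofList, List.mem_map]
  constructor
  · rintro ⟨x, hx, rfl⟩
    rw [List.mem_filter, PySem.Dict.items_counter, List.mem_map] at hx
    obtain ⟨⟨k, hk, rfl⟩, hcond⟩ := hx
    simp only [Bool.or_eq_true, Bool.and_eq_true, beq_iff_eq, PySem.Set.contains_iff] at hcond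
    rw [pv_count_flatMap] at hcond
    rcases hcond with h | ⟨h, hm⟩
    · left; exact_mod_cast h
    · right; exact ⟨by exact_mod_cast h, hm⟩
  · intro h
    have hpos : 0 < pvCnt q active := by rcases h with h | ⟨h, _⟩ <;> omega
    have hmem : q ∈ active.flatMap pvNb := (pv_mem_flatMap_iff q active).2 hpos
    refine ⟨(q, (List.count q (active.flatMap pvNb) : Int)), ?_, rfl⟩
    rw [List.mem_filter, PySem.Dict.items_counter, List.mem_map]
    refine ⟨⟨q, (PySem.Set.mem_ofList _ q).2 hmem, rfl⟩, ?_⟩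
    simp only [Bool.or_eq_true, Bool.and_eq_true, beq_iff_eq, PySem.Set.contains_iff]
    rw [pv_count_flatMap]
    rcases h with h | ⟨h, hm⟩
    · left; exact_mod_cast h
    · right; exact ⟨by exact_mod_cast h, hm⟩

lemma pv_step_equiv (cubes active : PySem.Set PvP) (hnd : cubes.Nodup)
    (hperm : cubes.Perm active) :
    (pvStepA cubes).Nodup ∧ (pvStepA cubes).Perm (pvStepB active) := by
  have nd1 : (pvStepA cubes).Nodup := by
    simp only [pvStepA]; exact PySem.Set.nodup_ofList _
  have nd2 : (pvStepB active).Nodup := by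
    simp only [pvStepB]; exact PySem.Set.nodup_ofList _
  refine ⟨nd1, (List.perm_ext_iff_of_nodup nd1 nd2).2 fun q => ?_⟩
  have hc : pvCnt q cubes = pvCnt q active := List.Perm.countP_eq _ hperm
  have hm : (q ∈ cubes) ↔ (q ∈ active) := hperm.mem_iff
  rw [pv_stepA_mem cubes hnd q, pv_stepB_mem active q, hc, hm]
  by_cases hmq : q ∈ active <;> simp [hmq] <;> omega

lemma pv_loop_equiv (l : List Int) (s s' : PySem.Set PvP) (hnd : s.Nodup) (hperm : s.Perm s') :
    (l.foldl (fun c _ => pvStepA c) s).Nodup ∧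
    (l.foldl (fun c _ => pvStepA c) s).Perm (l.foldl (fun c _ => pvStepB c) s') := by
  induction l generalizing s s' with
  | nil => exact ⟨hnd, hperm⟩
  | cons x xs ih =>
    obtain ⟨h1, h2⟩ := pv_step_equiv s s' hnd hperm
    exact ih (pvStepA s) (pvStepB s') h1 h2

-- ===== VERDICT (by name: the statement is the Claim_ definition above) =====
theorem problem_17_b_spec : Claim_equal_problem_17_b := by
  intro lines _
  unfold Spec_problem_17_b problem_17_b problem_17_b_alt
  have h := pv_loop_equiv (PySem.List.pyRange 0 6 1) (pvInitA lines) (pvInitB lines)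
    (PySem.Set.nodup_ofList _) (by rw [show pvInitA = pvInitB from rfl])
  unfold PySem.List.len
  exact congrArg _ h.2.length_eq
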